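-- pv_equiv track=rewrite | github.com/lakshaygola/Data-Structure-Algorithms | DSA Problems with solution/Camel Cases.py | minimumNumber1
-- ===== SOURCE A (Python) =====
-- num = '1234567890'
--
-- upper = 'ABCDEFGHIJKLMNOPQRSTUVWXYZ'
--
-- lower = 'abcdefghijklmnopqrstuvwxyz'
--
-- special = '@_!#$%^&*()<>\?/|}{~:'
--
-- def minimumNumber1(n, password):
--     count = 0
--     if all(n not in password for n in num):
--         count= count + 1
--     if all(l not in password for l in lower):
--         count= count + 1
--     if all(u not in password for u in upper):
--         count = count + 1
--     if all(s not in password for s in special):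
--         count = count + 1
--     count = count + max(0, 6-n)
--
--     return count
-- ===== SOURCE B (Python) =====
-- special = '@_!#$%^&*()<>\?/|}{~:'
--
-- def minimumNumber1(n, password):
--     has_digit = has_lower = has_upper = has_special = False
--     for ch in password:
--         if '0' <= ch <= '9':
--             has_digit = True
--         elif 'a' <= ch <= 'z':
--             has_lower = True
--         elif 'A' <= ch <= 'Z':
--             has_upper = True
--         elif ch in special:
--             has_special = True
--     missing = (not has_digit) + (not has_lower) + (not has_upper) + (not has_special)
--     return missing + (0 if n >= 6 else 6 - n)
-- ===== Notes on version B (the rewrite author's own statement) =====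
-- stated objective: alternative
-- what changed: A makes four passes driven by the charset strings, testing each charset character for substring membership in the password; B makes a single pass over the password maintaining four boolean presence flags (digit/lower/upper tested by character-range comparison, special by membership) and returns the count of unset flags plus the length padding.
import Mathlib
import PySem

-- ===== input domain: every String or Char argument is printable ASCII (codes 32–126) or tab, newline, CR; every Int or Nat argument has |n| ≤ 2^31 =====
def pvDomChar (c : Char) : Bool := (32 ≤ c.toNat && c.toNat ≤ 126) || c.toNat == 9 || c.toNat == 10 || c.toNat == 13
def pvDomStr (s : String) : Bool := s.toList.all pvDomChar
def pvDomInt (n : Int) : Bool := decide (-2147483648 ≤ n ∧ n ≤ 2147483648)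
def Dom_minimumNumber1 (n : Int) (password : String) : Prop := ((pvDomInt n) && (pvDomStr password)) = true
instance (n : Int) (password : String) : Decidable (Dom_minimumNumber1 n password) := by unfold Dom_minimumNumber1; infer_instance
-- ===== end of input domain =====

-- B replaces A's four charset-driven substring scans by one pass over the password keeping four
-- boolean presence flags (digit/lower/upper by character-range comparison, special by membership);
-- the return value is proved identical everywhere.

-- ===== PORT A =====
-- the module-level charset string constants of A, as their character sequences
def numChars : List Char := ['1', '2', '3', '4', '5', '6', '7', '8', '9', '0']
def upperChars : List Char := ['A', 'B', 'C', 'D', 'E', 'F', 'G', 'H', 'I', 'J', 'K', 'L', 'M', 'N', 'O', 'P', 'Q', 'R', 'S', 'T', 'U', 'V', 'W', 'X', 'Y', 'Z']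
def lowerChars : List Char := ['a', 'b', 'c', 'd', 'e', 'f', 'g', 'h', 'i', 'j', 'k', 'l', 'm', 'n', 'o', 'p', 'q', 'r', 's', 't', 'u', 'v', 'w', 'x', 'y', 'z']
def specialChars : List Char := ['@', '_', '!', '#', '$', '%', '^', '&', '*', '(', ')', '<', '>', '\\', '?', '/', '|', '}', '{', '~', ':']

-- 'x in password' for a single-character x is PySem.Str.isIn (Python's substring test; exact)
def minimumNumber1 (n : Int) (password : String) : Int :=
  let count : Int := 0
  let count := if numChars.all (fun x => !(PySem.Str.isIn (String.ofList [x]) password)) then count + 1 else count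
  let count := if lowerChars.all (fun l => !(PySem.Str.isIn (String.ofList [l]) password)) then count + 1 else count
  let count := if upperChars.all (fun u => !(PySem.Str.isIn (String.ofList [u]) password)) then count + 1 else count
  let count := if specialChars.all (fun s => !(PySem.Str.isIn (String.ofList [s]) password)) then count + 1 else count
  let count := count + max 0 (6 - n)
  count

-- ===== PORT B =====
-- B's module-level constant: the special-character string
def specialB : String := "@_!#$%^&*()<>\\?/|}{~:"

-- the body of B's single loop: update the four presence flags from one character
def pvFlagStep (st : Bool × Bool × Bool × Bool) (ch : Char) : Bool × Bool × Bool × Bool :=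
  if '0' ≤ ch ∧ ch ≤ '9' then (true, st.2.1, st.2.2.1, st.2.2.2)
  else if 'a' ≤ ch ∧ ch ≤ 'z' then (st.1, true, st.2.2.1, st.2.2.2)
  else if 'A' ≤ ch ∧ ch ≤ 'Z' then (st.1, st.2.1, true, st.2.2.2)
  else if specialB.toList.contains ch then (st.1, st.2.1, st.2.2.1, true)
  else st

def minimumNumber1_alt (n : Int) (password : String) : Int :=
  let st := password.toList.foldl pvFlagStep (false, false, false, false)
  let missing : Int := (if st.1 then 0 else 1) + (if st.2.1 then 0 else 1) +
    (if st.2.2.1 then 0 else 1) + (if st.2.2.2 then 0 else 1)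
  missing + (if n ≥ 6 then 0 else 6 - n)

-- ===== PRECONDITION & SPEC =====
def Spec_minimumNumber1 (n : Int) (password : String) (out : Int) : Prop := out = minimumNumber1_alt n password
instance (n : Int) (password : String) (out : Int) : Decidable (Spec_minimumNumber1 n password out) := by unfold Spec_minimumNumber1; infer_instance

-- ===== CLAIM (what is proved, stated in full; the proofs are below) =====
def Claim_equal_minimumNumber1 : Prop := ∀ (n : Int) (password : String), Dom_minimumNumber1 n password → Spec_minimumNumber1 n password (minimumNumber1 n password)

-- ===== LEMMAS AND PROOFS =====

-- 'c in password' for a one-character string is character membership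
theorem charsIsIn_single (c : Char) (l : List Char) :
    PySem.Chars.isIn [c] l = l.contains c := by
  cases hc : l.contains c
  · have h : ¬ (PySem.Chars.isIn [c] l = true) := by
      rw [PySem.Chars.isIn_iff_infix, List.singleton_infix_iff]
      simpa using hc
    simpa using h
  · rw [PySem.Chars.isIn_iff_infix, List.singleton_infix_iff]
    simpa using hc

theorem isIn_single (c : Char) (s : String) :
    PySem.Str.isIn (String.ofList [c]) s = s.toList.contains c := by
  rw [show PySem.Str.isIn (String.ofList [c]) s = PySem.Chars.isIn [c] s.toList by
    simp [PySem.Str.isIn]]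
  exact charsIsIn_single c s.toList

-- A's membership test over a charset, rephrased as 'some password character is in the charset'
theorem all_not_isIn (l : List Char) (s : String) :
    (l.all fun x => !(PySem.Str.isIn (String.ofList [x]) s))
      = !(s.toList.any fun c => l.contains c) := by
  simp only [isIn_single]
  cases h : s.toList.any fun c => l.contains c
  · rw [List.any_eq_false] at h
    rw [Bool.not_false, List.all_eq_true]
    intro x hx
    rw [Bool.not_eq_eq_eq_not, Bool.not_true, List.contains_eq_mem, decide_eq_false_iff_not]
    intro hm
    exact (h x hm) (by simpa [List.contains_eq_mem] using hx)
  · rw [List.any_eq_true] at h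
    obtain ⟨c, hc, hcl⟩ := h
    rw [Bool.not_true, List.all_eq_false]
    exact ⟨c, by simpa [List.contains_eq_mem] using hcl, by
      simp [List.contains_eq_mem, hc]⟩

-- character order / equality seen through code points
theorem char_le_iff (a b : Char) : a ≤ b ↔ a.val.toNat ≤ b.val.toNat := Iff.rfl
theorem char_eq_iff (a b : Char) : a = b ↔ a.val.toNat = b.val.toNat :=
  ⟨fun h => h ▸ rfl, fun h => Char.ext (UInt32.toNat_inj.mp h)⟩

-- membership in each charset list is exactly the corresponding code-point range test
theorem num_contains (c : Char) : numChars.contains c = decide ('0' ≤ c ∧ c ≤ '9') := by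
  rw [Bool.eq_iff_iff, List.contains_iff_mem, decide_eq_true_eq]
  simp only [numChars, List.mem_cons, List.not_mem_nil, or_false, char_eq_iff, char_le_iff]
  simp only [show ('0':Char).val.toNat = 48 from rfl,
    show ('1':Char).val.toNat = 49 from rfl,
    show ('2':Char).val.toNat = 50 from rfl,
    show ('3':Char).val.toNat = 51 from rfl,
    show ('4':Char).val.toNat = 52 from rfl,
    show ('5':Char).val.toNat = 53 from rfl,
    show ('6':Char).val.toNat = 54 from rfl,
    show ('7':Char).val.toNat = 55 from rfl,
    show ('8':Char).val.toNat = 56 from rfl,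
    show ('9':Char).val.toNat = 57 from rfl]
  omega

theorem lower_contains (c : Char) : lowerChars.contains c = decide ('a' ≤ c ∧ c ≤ 'z') := by
  rw [Bool.eq_iff_iff, List.contains_iff_mem, decide_eq_true_eq]
  simp only [lowerChars, List.mem_cons, List.not_mem_nil, or_false, char_eq_iff, char_le_iff]
  simp only [show ('a':Char).val.toNat = 97 from rfl,
    show ('b':Char).val.toNat = 98 from rfl,
    show ('c':Char).val.toNat = 99 from rfl,
    show ('d':Char).val.toNat = 100 from rfl,
    show ('e':Char).val.toNat = 101 from rfl,
    show ('f':Char).val.toNat = 102 from rfl,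
    show ('g':Char).val.toNat = 103 from rfl,
    show ('h':Char).val.toNat = 104 from rfl,
    show ('i':Char).val.toNat = 105 from rfl,
    show ('j':Char).val.toNat = 106 from rfl,
    show ('k':Char).val.toNat = 107 from rfl,
    show ('l':Char).val.toNat = 108 from rfl,
    show ('m':Char).val.toNat = 109 from rfl,
    show ('n':Char).val.toNat = 110 from rfl,
    show ('o':Char).val.toNat = 111 from rfl,
    show ('p':Char).val.toNat = 112 from rfl,
    show ('q':Char).val.toNat = 113 from rfl,
    show ('r':Char).val.toNat = 114 from rfl,
    show ('s':Char).val.toNat = 115 from rfl,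
    show ('t':Char).val.toNat = 116 from rfl,
    show ('u':Char).val.toNat = 117 from rfl,
    show ('v':Char).val.toNat = 118 from rfl,
    show ('w':Char).val.toNat = 119 from rfl,
    show ('x':Char).val.toNat = 120 from rfl,
    show ('y':Char).val.toNat = 121 from rfl,
    show ('z':Char).val.toNat = 122 from rfl]
  omega

theorem upper_contains (c : Char) : upperChars.contains c = decide ('A' ≤ c ∧ c ≤ 'Z') := by
  rw [Bool.eq_iff_iff, List.contains_iff_mem, decide_eq_true_eq]
  simp only [upperChars, List.mem_cons, List.not_mem_nil, or_false, char_eq_iff, char_le_iff]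
  simp only [show ('A':Char).val.toNat = 65 from rfl,
    show ('B':Char).val.toNat = 66 from rfl,
    show ('C':Char).val.toNat = 67 from rfl,
    show ('D':Char).val.toNat = 68 from rfl,
    show ('E':Char).val.toNat = 69 from rfl,
    show ('F':Char).val.toNat = 70 from rfl,
    show ('G':Char).val.toNat = 71 from rfl,
    show ('H':Char).val.toNat = 72 from rfl,
    show ('I':Char).val.toNat = 73 from rfl,
    show ('J':Char).val.toNat = 74 from rfl,
    show ('K':Char).val.toNat = 75 from rfl,
    show ('L':Char).val.toNat = 76 from rfl,
    show ('M':Char).val.toNat = 77 from rfl,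
    show ('N':Char).val.toNat = 78 from rfl,
    show ('O':Char).val.toNat = 79 from rfl,
    show ('P':Char).val.toNat = 80 from rfl,
    show ('Q':Char).val.toNat = 81 from rfl,
    show ('R':Char).val.toNat = 82 from rfl,
    show ('S':Char).val.toNat = 83 from rfl,
    show ('T':Char).val.toNat = 84 from rfl,
    show ('U':Char).val.toNat = 85 from rfl,
    show ('V':Char).val.toNat = 86 from rfl,
    show ('W':Char).val.toNat = 87 from rfl,
    show ('X':Char).val.toNat = 88 from rfl,
    show ('Y':Char).val.toNat = 89 from rfl,
    show ('Z':Char).val.toNat = 90 from rfl]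
  omega

-- B's special string holds the same characters as A's charset constant
theorem specialB_toList : specialB.toList = specialChars := by decide

-- no special character lies in any of the three ranges
theorem special_not_range (c : Char) (h : specialChars.contains c = true) :
    ¬('0' ≤ c ∧ c ≤ '9') ∧ ¬('a' ≤ c ∧ c ≤ 'z') ∧ ¬('A' ≤ c ∧ c ≤ 'Z') := by
  rw [List.contains_iff_mem] at h
  fin_cases h <;> exact ⟨by decide, by decide, by decide⟩

-- the charsets are pairwise disjoint (checked character by character over the literal lists)
theorem disj_lower_num : ∀ c ∈ lowerChars, c ∉ numChars := by intro c hc; fin_cases hc <;> decide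
theorem disj_upper_num : ∀ c ∈ upperChars, c ∉ numChars := by intro c hc; fin_cases hc <;> decide
theorem disj_upper_lower : ∀ c ∈ upperChars, c ∉ lowerChars := by intro c hc; fin_cases hc <;> decide

theorem contains_false_of_disj {l m : List Char} (hd : ∀ c ∈ l, c ∉ m) {c : Char}
    (h : m.contains c = true) : l.contains c = false := by
  simp only [List.contains_eq_mem, decide_eq_true_eq, decide_eq_false_iff_not] at *
  intro hcl
  exact hd c hcl h

-- the loop invariant: after folding, each flag records whether its class occurred
theorem foldFlags (cs : List Char) (d l u s : Bool) :
    cs.foldl pvFlagStep (d, l, u, s)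
      = (d || cs.any (fun c => numChars.contains c),
         l || cs.any (fun c => lowerChars.contains c),
         u || cs.any (fun c => upperChars.contains c),
         s || cs.any (fun c => specialChars.contains c)) := by
  induction cs generalizing d l u s with
  | nil => simp
  | cons c cs ih =>
    rw [List.foldl_cons]
    simp only [List.any_cons]
    by_cases h1 : '0' ≤ c ∧ c ≤ '9'
    · rw [show pvFlagStep (d, l, u, s) c = (true, l, u, s) from by
        unfold pvFlagStep; rw [if_pos h1], ih]
      have e1 : numChars.contains c = true := by rw [num_contains]; exact decide_eq_true h1
      have e2 : lowerChars.contains c = false := by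
        exact contains_false_of_disj disj_lower_num e1
      have e3 : upperChars.contains c = false := by
        exact contains_false_of_disj disj_upper_num e1
      have e4 : specialChars.contains c = false := by
        cases hs : specialChars.contains c
        · rfl
        · exact absurd h1 (special_not_range c hs).1
      rw [e1, e2, e3, e4]
      simp
    · by_cases h2 : 'a' ≤ c ∧ c ≤ 'z'
      · rw [show pvFlagStep (d, l, u, s) c = (d, true, u, s) from by
          unfold pvFlagStep; rw [if_neg h1, if_pos h2], ih]
        have e1 : numChars.contains c = false := by
          rw [num_contains]; exact decide_eq_false h1
        have e2 : lowerChars.contains c = true := by rw [lower_contains]; exact decide_eq_true h2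
        have e3 : upperChars.contains c = false := by
          exact contains_false_of_disj disj_upper_lower e2
        have e4 : specialChars.contains c = false := by
          cases hs : specialChars.contains c
          · rfl
          · exact absurd h2 (special_not_range c hs).2.1
        rw [e1, e2, e3, e4]
        simp
      · by_cases h3 : 'A' ≤ c ∧ c ≤ 'Z'
        · rw [show pvFlagStep (d, l, u, s) c = (d, l, true, s) from by
            unfold pvFlagStep; rw [if_neg h1, if_neg h2, if_pos h3], ih]
          have e1 : numChars.contains c = false := by
            rw [num_contains]; exact decide_eq_false h1
          have e2 : lowerChars.contains c = false := by
            rw [lower_contains]; exact decide_eq_false h2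
          have e3 : upperChars.contains c = true := by rw [upper_contains]; exact decide_eq_true h3
          have e4 : specialChars.contains c = false := by
            cases hs : specialChars.contains c
            · rfl
            · exact absurd h3 (special_not_range c hs).2.2
          rw [e1, e2, e3, e4]
          simp
        · by_cases h4 : specialB.toList.contains c = true
          · rw [show pvFlagStep (d, l, u, s) c = (d, l, u, true) from by
              unfold pvFlagStep; rw [if_neg h1, if_neg h2, if_neg h3, if_pos h4], ih]
            have e1 : numChars.contains c = false := by
              rw [num_contains]; exact decide_eq_false h1
            have e2 : lowerChars.contains c = false := by
              rw [lower_contains]; exact decide_eq_false h2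
            have e3 : upperChars.contains c = false := by
              rw [upper_contains]; exact decide_eq_false h3
            have e4 : specialChars.contains c = true := by rw [← specialB_toList]; exact h4
            rw [e1, e2, e3, e4]
            simp
          · rw [show pvFlagStep (d, l, u, s) c = (d, l, u, s) from by
              unfold pvFlagStep; rw [if_neg h1, if_neg h2, if_neg h3, if_neg h4], ih]
            have e1 : numChars.contains c = false := by
              rw [num_contains]; exact decide_eq_false h1
            have e2 : lowerChars.contains c = false := by
              rw [lower_contains]; exact decide_eq_false h2
            have e3 : upperChars.contains c = false := by
              rw [upper_contains]; exact decide_eq_false h3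
            have e4 : specialChars.contains c = false := by
              rw [← specialB_toList]; exact Bool.not_eq_true _ ▸ eq_false_of_ne_true h4
            rw [e1, e2, e3, e4]
            simp

-- ===== VERDICT =====
theorem minimumNumber1_spec : Claim_equal_minimumNumber1 := by
  intro n password _
  unfold Spec_minimumNumber1 minimumNumber1 minimumNumber1_alt
  simp only [all_not_isIn, foldFlags, Bool.false_or]
  have hmax : max 0 (6 - n) = if n ≥ 6 then (0 : Int) else 6 - n := by omega
  rw [hmax]
  cases password.toList.any fun c => numChars.contains c <;>
    cases password.toList.any fun c => lowerChars.contains c <;>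
    cases password.toList.any fun c => upperChars.contains c <;>
    cases password.toList.any fun c => specialChars.contains c <;>
    simp
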